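-- pv_equiv track=rewrite | github.com/jfilak/sapcli | sap/adt/function.py | get_parameters_block
-- ===== SOURCE A (Python) =====
-- def get_parameters_block(source_lines):
--     """Get parameters block of function module
--
--     The block is delimited by '*"--' lines.
--     Example:
--     *"----------------------------------------------------------------------
--     *"*"Local Interface:
--     ...
--     *"----------------------------------------------------------------------
--     """
--
--     start_block = 0
--     end_block = 0
--     for i, line in enumerate(source_lines):
--         if line.startswith('*"--'):
--             start_block = i
--             break
--
--     for i, line in enumerate(source_lines[start_block + 1:]):
--         if line.startswith('*"--'):
--             end_block = i + start_block + 1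
--             break
--
--     return start_block, end_block
-- ===== SOURCE B (Python) =====
-- def get_parameters_block(source_lines):
--     matches = [i for i, line in enumerate(source_lines) if line.startswith('*"--')]
--     start_block = matches[0] if matches else 0
--     end_block = matches[1] if len(matches) > 1 else 0
--     return start_block, end_block
-- ===== Notes on version B (the rewrite author's own statement) =====
-- stated objective: simpler
-- what changed: Replaces A's two sequential break-scans (the second over a slice) by one full pass collecting all delimiter indices, then picks the first and second index with default 0.
import Mathlib
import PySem

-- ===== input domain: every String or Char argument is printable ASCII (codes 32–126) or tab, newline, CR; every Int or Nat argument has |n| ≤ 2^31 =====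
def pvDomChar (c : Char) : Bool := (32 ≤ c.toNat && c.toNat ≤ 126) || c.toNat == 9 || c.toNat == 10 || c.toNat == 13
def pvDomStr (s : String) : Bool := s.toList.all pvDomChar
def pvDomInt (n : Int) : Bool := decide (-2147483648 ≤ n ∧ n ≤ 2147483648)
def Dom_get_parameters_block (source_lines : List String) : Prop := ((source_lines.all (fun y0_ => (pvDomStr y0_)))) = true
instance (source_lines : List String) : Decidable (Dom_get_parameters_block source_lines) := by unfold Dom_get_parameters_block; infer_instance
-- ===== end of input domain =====

-- B collects all delimiter indices in one pass and takes the first/second with default 0,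
-- replacing A's two sequential break-scans; objective: simpler.

-- ===== PORT A =====
-- first loop of A: 'for i, line in enumerate(...): if line.startswith('*"--'): start_block = i; break'
-- (start_block initialised to 0, so 0 if no match)
def pvLoopA1 : List String → Int → Int
  | [], _ => 0
  | l :: rest, i => if PySem.Str.startswith l "*\"--" then i else pvLoopA1 rest (i + 1)

-- second loop of A over the slice: 'end_block = i + start_block + 1; break' (0 if no match)
def pvLoopA2 : List String → Int → Int → Int
  | [], _, _ => 0
  | l :: rest, i, s => if PySem.Str.startswith l "*\"--" then i + s + 1 else pvLoopA2 rest (i + 1) s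

def get_parameters_block (source_lines : List String) : Int × Int :=
  let start_block := pvLoopA1 source_lines 0
  let end_block := pvLoopA2 (PySem.List.slice source_lines (some (start_block + 1)) none) 0 start_block
  (start_block, end_block)

-- ===== PORT B =====
-- '[i for i, line in enumerate(source_lines) if line.startswith('*"--')]'
def pvMatches : List String → Int → List Int
  | [], _ => []
  | l :: rest, i =>
      if PySem.Str.startswith l "*\"--" then i :: pvMatches rest (i + 1) else pvMatches rest (i + 1)

def get_parameters_block_alt (source_lines : List String) : Int × Int :=
  let ms := pvMatches source_lines 0
  let start_block := ms.headD 0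
  let end_block := (ms[1]?).getD 0
  (start_block, end_block)

-- ===== PRECONDITION & SPEC =====
def Spec_get_parameters_block (source_lines : List String) (out : Int × Int) : Prop := out = get_parameters_block_alt source_lines
instance (source_lines : List String) (out : Int × Int) : Decidable (Spec_get_parameters_block source_lines out) := by unfold Spec_get_parameters_block; infer_instance

-- ===== CLAIM (what is proved, stated in full; the proofs are below) =====
def Claim_equal_get_parameters_block : Prop := ∀ (source_lines : List String), Dom_get_parameters_block source_lines → Spec_get_parameters_block source_lines (get_parameters_block source_lines)

-- ===== LEMMAS AND PROOFS =====

-- the match predicate, abbreviated for the lemmas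
def pvP (l : String) : Bool := PySem.Str.startswith l "*\"--"

-- no-match case
theorem pvLoopA1_none (lines : List String) (h : ∀ l ∈ lines, pvP l = false) (i : Int) :
    pvLoopA1 lines i = 0 := by
  induction lines generalizing i with
  | nil => rfl
  | cons a t ih =>
      have ha := h a (by simp)
      simp only [pvLoopA1, pvP] at ha ⊢
      rw [ha]
      simp [ih (fun l hl => h l (by simp [hl]))]

theorem pvLoopA2_none (lines : List String) (h : ∀ l ∈ lines, pvP l = false) (i s : Int) :
    pvLoopA2 lines i s = 0 := by
  induction lines generalizing i with
  | nil => rfl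
  | cons a t ih =>
      have ha := h a (by simp)
      simp only [pvLoopA2, pvP] at ha ⊢
      rw [ha]
      simp [ih (fun l hl => h l (by simp [hl]))]

theorem pvMatches_none (lines : List String) (h : ∀ l ∈ lines, pvP l = false) (i : Int) :
    pvMatches lines i = [] := by
  induction lines generalizing i with
  | nil => rfl
  | cons a t ih =>
      have ha := h a (by simp)
      simp only [pvMatches, pvP] at ha ⊢
      rw [ha]
      simp [ih (fun l hl => h l (by simp [hl]))]

-- first-match decomposition
theorem pv_first_match (lines : List String) (h : ¬ ∀ l ∈ lines, pvP l = false) :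
    ∃ pre l post, lines = pre ++ l :: post ∧ (∀ x ∈ pre, pvP x = false) ∧ pvP l = true := by
  induction lines with
  | nil => exact absurd (by simp) h
  | cons a t ih =>
      by_cases ha : pvP a = true
      · exact ⟨[], a, t, by simp, by simp, ha⟩
      · have : ¬ ∀ l ∈ t, pvP l = false := by
          intro hall
          exact h (by
            intro l hl
            rcases List.mem_cons.mp hl with rfl | hl
            · simpa using ha
            · exact hall l hl)
        obtain ⟨pre, l, post, he, hpre, hl⟩ := ih this
        exact ⟨a :: pre, l, post, by simp [he], by
          intro x hx
          rcases List.mem_cons.mp hx with rfl | hx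
          · simpa using ha
          · exact hpre x hx, hl⟩

-- values on a first-match decomposition
theorem pvLoopA1_split (pre : List String) (l : String) (post : List String)
    (hpre : ∀ x ∈ pre, pvP x = false) (hl : pvP l = true) (i : Int) :
    pvLoopA1 (pre ++ l :: post) i = i + pre.length := by
  induction pre generalizing i with
  | nil =>
      simp only [List.nil_append, pvLoopA1]
      simp only [pvP] at hl
      rw [hl]
      simp
  | cons a t ih =>
      have ha := hpre a (by simp)
      simp only [List.cons_append, pvLoopA1, pvP] at ha ⊢
      rw [ha]
      simp only [Bool.false_eq_true, if_false]
      rw [ih (fun x hx => hpre x (by simp [hx])) (i + 1)]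
      simp only [List.length_cons]
      push_cast
      ring

theorem pvMatches_split (pre : List String) (l : String) (post : List String)
    (hpre : ∀ x ∈ pre, pvP x = false) (hl : pvP l = true) (i : Int) :
    pvMatches (pre ++ l :: post) i = (i + pre.length) :: pvMatches post (i + pre.length + 1) := by
  induction pre generalizing i with
  | nil =>
      simp only [List.nil_append, pvMatches]
      simp only [pvP] at hl
      rw [hl]
      simp
  | cons a t ih =>
      have ha := hpre a (by simp)
      simp only [List.cons_append, pvMatches, pvP] at ha ⊢
      rw [ha]
      simp only [Bool.false_eq_true, if_false]
      rw [ih (fun x hx => hpre x (by simp [hx])) (i + 1)]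
      have h1 : (i + 1) + (t.length : Int) = i + ((a :: t).length : Int) := by
        simp only [List.length_cons]; push_cast; ring
      rw [h1]

-- A's second loop equals the head of B's match list over the same tail
theorem pvLoopA2_eq_matches (lines : List String) (i s : Int) :
    pvLoopA2 lines i s = (pvMatches lines (i + s + 1)).headD 0 := by
  induction lines generalizing i with
  | nil => rfl
  | cons a t ih =>
      simp only [pvLoopA2, pvMatches]
      by_cases ha : PySem.Str.startswith a "*\"--" = true
      · rw [if_pos ha, if_pos ha]; simp
      · rw [if_neg ha, if_neg ha]
        rw [ih (i + 1)]
        have : (i + 1) + s + 1 = (i + s + 1) + 1 := by ring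
        rw [this]

-- ===== VERDICT (by name: the statement is the Claim_ definition above) =====
theorem get_parameters_block_spec : Claim_equal_get_parameters_block := by
  intro lines _
  unfold Spec_get_parameters_block get_parameters_block get_parameters_block_alt
  dsimp only
  by_cases h : ∀ l ∈ lines, pvP l = false
  · rw [pvLoopA1_none lines h 0, pvMatches_none lines h 0]
    have hs : PySem.List.slice lines (some ((0 : Int) + 1)) none = lines.tail := by
      have : ((0 : Int) + 1) = ((1 : ℕ) : Int) := by norm_num
      rw [this, PySem.List.slice_from_natCast]
      simp [List.drop_one]
    rw [hs, pvLoopA2_none lines.tail (fun l hl => h l (List.mem_of_mem_tail hl)) 0 0]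
    simp
  · obtain ⟨pre, l, post, he, hpre, hl⟩ := pv_first_match lines h
    subst he
    rw [pvLoopA1_split pre l post hpre hl 0, pvMatches_split pre l post hpre hl 0]
    have hslice : PySem.List.slice (pre ++ l :: post) (some (((0 : Int) + (pre.length : Int)) + 1)) none = post := by
      have : ((0 : Int) + (pre.length : Int)) + 1 = ((pre.length + 1 : ℕ) : Int) := by push_cast; ring
      rw [this, PySem.List.slice_from_natCast]
      rw [List.drop_append]
      simp
    rw [hslice, pvLoopA2_eq_matches post 0 ((0 : Int) + (pre.length : Int))]
    have h2 : (0 : Int) + ((0 : Int) + (pre.length : Int)) + 1 = (0 : Int) + (pre.length : Int) + 1 := by ring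
    rw [h2]
    cases pvMatches post ((0 : Int) + (pre.length : Int) + 1) <;> simp
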